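-- pv_equiv track=rewrite | github.com/seapagan/aoc2022 | day-08/main.py | part_2
-- ===== SOURCE A (Python) =====
-- def check_up(row, column: int, tree_grid: list[list[int]]) -> int:
--     up = 0
--     this_tree = tree_grid[row][column]
--     for i in range(row - 1, -1, -1):
--         up += 1
--         if tree_grid[i][column] >= this_tree:
--             break
--     return up
--
-- def check_down(row, column: int, tree_grid: list[list[int]]) -> int:
--     down = 0
--     this_tree = tree_grid[row][column]
--     for i in range(row + 1, len(tree_grid)):
--         down += 1
--         if tree_grid[i][column] >= this_tree:
--             break
--     return down
--
-- def check_left(row, column: int, tree_grid: list[list[int]]) -> int: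
--     left = 0
--     this_tree = tree_grid[row][column]
--     for i in range(column - 1, -1, -1):
--         left += 1
--         if tree_grid[row][i] >= this_tree:
--             break
--     return left
--
-- def check_right(row, column: int, tree_grid: list[list[int]]) -> int:
--     right = 0
--     this_tree = tree_grid[row][column]
--     for i in range(column + 1, len(tree_grid[row])):
--         right += 1
--         if tree_grid[row][i] >= this_tree:
--             break
--     return right
--
-- def part_2(tree_grid: list[list[int]]) -> int:
--     best = 0
--     for row in range(len(tree_grid)):
--         for column in range(len(tree_grid[row])):
--             up = check_up(row, column, tree_grid)
--             down = check_down(row, column, tree_grid)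
--             left = check_left(row, column, tree_grid)
--             right = check_right(row, column, tree_grid)
--             best = max(best, up * down * left * right)
--     return best
-- ===== SOURCE B (Python) =====
-- def part_2(tree_grid: list[list[int]]) -> int:
--     # One monotonic-stack pass per line (and per reversed line) computes every
--     # viewing distance for that direction in O(len) instead of a scan per cell.
--     def dists(line):
--         # dists toward index 0: d[j] = distance to nearest i < j with line[i] >= line[j]
--         res = []
--         stack = []  # indices with non-increasing heights bottom-to-top
--         for j, h in enumerate(line):
--             while stack and line[stack[-1]] < h:
--                 stack.pop()
--             res.append(j - stack[-1] if stack else j)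
--             stack.append(j)
--         return res
--
--     ncols = len(tree_grid[0]) if tree_grid else 0
--     cols = [[row[c] for row in tree_grid] for c in range(ncols)]
--     ups = [dists(col) for col in cols]
--     downs = [dists(col[::-1])[::-1] for col in cols]
--     best = 0
--     for r, row in enumerate(tree_grid):
--         lefts = dists(row)
--         rights = dists(row[::-1])[::-1]
--         for c in range(len(row)):
--             best = max(best, ups[c][r] * downs[c][r] * lefts[c] * rights[c])
--     return best
-- ===== Notes on version B (the rewrite author's own statement) =====
-- stated objective: faster
-- what changed: A rescans the grid in all four directions from every cell; B makes one monotonic-stack pass per row/column (and per reversed row/column), computing every viewing distance of a direction in linear time, then combines the four precomputed distance tables.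
import Mathlib
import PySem

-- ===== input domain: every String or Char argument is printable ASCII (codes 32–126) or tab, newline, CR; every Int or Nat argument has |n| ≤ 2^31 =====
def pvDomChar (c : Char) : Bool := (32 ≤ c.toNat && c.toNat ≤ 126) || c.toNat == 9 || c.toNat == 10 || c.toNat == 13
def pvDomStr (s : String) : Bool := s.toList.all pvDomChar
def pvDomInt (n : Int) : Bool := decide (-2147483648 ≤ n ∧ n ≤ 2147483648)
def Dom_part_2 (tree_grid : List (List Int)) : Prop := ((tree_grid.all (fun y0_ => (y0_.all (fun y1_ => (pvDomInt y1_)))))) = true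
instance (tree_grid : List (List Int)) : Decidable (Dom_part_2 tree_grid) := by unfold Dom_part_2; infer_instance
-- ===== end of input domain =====

-- B replaces A's per-cell directional re-scans with one monotonic-stack pass per line
-- (and per reversed line), computing all viewing distances of a direction at once (objective: faster).
-- A raises IndexError on non-rectangular grids with ≥ 2 rows; Pre_ excludes exactly those.

-- ===== PORT A =====
-- tree_grid[i][j] (indices produced by range(); in range under Pre_)
def pyCell (tree_grid : List (List Int)) (i j : Int) : Int :=
  PySem.List.pyGetD (PySem.List.pyGetD tree_grid i []) j 0

-- the shared shape of A's four helpers: 'for i in idxs: acc += 1; if val(i) >= this_tree: break'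
def scan_loop (val : Int → Int) (this_tree : Int) : List Int → Int → Int
  | [], acc => acc
  | i :: rest, acc =>
      if this_tree ≤ val i then acc + 1
      else scan_loop val this_tree rest (acc + 1)

def check_up (row column : Int) (tree_grid : List (List Int)) : Int :=
  scan_loop (fun i => pyCell tree_grid i column) (pyCell tree_grid row column)
    (PySem.List.pyRange (row - 1) (-1) (-1)) 0

def check_down (row column : Int) (tree_grid : List (List Int)) : Int :=
  scan_loop (fun i => pyCell tree_grid i column) (pyCell tree_grid row column)
    (PySem.List.pyRange (row + 1) (tree_grid.length : Int) 1) 0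

def check_left (row column : Int) (tree_grid : List (List Int)) : Int :=
  scan_loop (fun i => pyCell tree_grid row i) (pyCell tree_grid row column)
    (PySem.List.pyRange (column - 1) (-1) (-1)) 0

def check_right (row column : Int) (tree_grid : List (List Int)) : Int :=
  scan_loop (fun i => pyCell tree_grid row i) (pyCell tree_grid row column)
    (PySem.List.pyRange (column + 1) ((PySem.List.pyGetD tree_grid row []).length : Int) 1) 0

def part_2 (tree_grid : List (List Int)) : Int :=
  (PySem.List.pyRange 0 (tree_grid.length : Int) 1).foldl (fun best row =>
    (PySem.List.pyRange 0 ((PySem.List.pyGetD tree_grid row []).length : Int) 1).foldl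
      (fun best column =>
        max best (check_up row column tree_grid * check_down row column tree_grid *
                  check_left row column tree_grid * check_right row column tree_grid))
      best) 0

-- ===== PORT B =====
-- 'while stack and line[stack[-1]] < h: stack.pop()'  (head of the list = top of the stack)
def lds_pop (line : List Int) (h : Int) : List Int → List Int
  | [] => []
  | i :: rest => if PySem.List.pyGetD line i 0 < h then lds_pop line h rest else i :: rest

-- 'for j, h in enumerate(line): …'  (res accumulated reversed, reversed at the end)
def lds_go (line : List Int) : List (Int × Int) → List Int → List Int → List Int
  | [], _, res => res.reverse
  | (j, h) :: rest, stack, res =>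
      let stack' := lds_pop line h stack
      let d : Int := match stack' with | [] => j | i :: _ => j - i
      lds_go line rest (j :: stack') (d :: res)

def dists (line : List Int) : List Int :=
  lds_go line (PySem.List.enumerate line 0) [] []

def part_2_alt (tree_grid : List (List Int)) : Int :=
  let ncols : Int := match tree_grid with | [] => 0 | r0 :: _ => (r0.length : Int)
  let cols := (PySem.List.pyRange 0 ncols 1).map (fun c =>
      tree_grid.map (fun row => PySem.List.pyGetD row c 0))
  let ups := cols.map dists
  let downs := cols.map (fun col => (dists col.reverse).reverse)
  (PySem.List.enumerate tree_grid 0).foldl (fun best rrow =>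
    let lefts := dists rrow.2
    let rights := (dists rrow.2.reverse).reverse
    (PySem.List.pyRange 0 (rrow.2.length : Int) 1).foldl (fun best c =>
      max best (PySem.List.pyGetD (PySem.List.pyGetD ups c []) rrow.1 0 *
                PySem.List.pyGetD (PySem.List.pyGetD downs c []) rrow.1 0 *
                PySem.List.pyGetD lefts c 0 *
                PySem.List.pyGetD rights c 0))
      best) 0

-- ===== PRECONDITION & SPEC =====
-- Pre_ excludes only non-rectangular grids: there A always hits tree_grid[i][c] on a row
-- shorter than c+1 (an adjacent longer row exists) and raises IndexError.
def Pre_part_2 (tree_grid : List (List Int)) : Prop :=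
  ∀ row ∈ tree_grid, row.length = (tree_grid.headD []).length
instance (tree_grid : List (List Int)) : Decidable (Pre_part_2 tree_grid) := by
  unfold Pre_part_2; infer_instance

def pvWitness_part_2 : List (List Int) := [[3, 0, 2], [2, 5, 1]]

def Spec_part_2 (tree_grid : List (List Int)) (out : Int) : Prop := out = part_2_alt tree_grid
instance (tree_grid : List (List Int)) (out : Int) : Decidable (Spec_part_2 tree_grid out) := by
  unfold Spec_part_2; infer_instance

-- ===== CLAIM (what is proved, stated in full; the proofs are below) =====
def Claim_equal_part_2 : Prop := ∀ (tree_grid : List (List Int)), Dom_part_2 tree_grid → Pre_part_2 tree_grid → Spec_part_2 tree_grid (part_2 tree_grid)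

-- ===== LEMMAS AND PROOFS =====

-- the common specification of a viewing distance: values in looking order
def view (h : Int) : List Int → Int
  | [] => 0
  | a :: t => if h ≤ a then 1 else 1 + view h t

def specFrom (done : List Int) : List Int → List Int
  | [] => []
  | x :: t => view x done.reverse :: specFrom (done ++ [x]) t

theorem scan_loop_eq (val : Int → Int) (h : Int) :
    ∀ (idxs : List Int) (acc : Int),
      scan_loop val h idxs acc = acc + view h (idxs.map val) := by
  intro idxs
  induction idxs with
  | nil => intro acc; simp [scan_loop, view]
  | cons i rest ih =>
    intro acc
    simp only [scan_loop, List.map, view]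
    split
    · ring
    · rw [ih]; ring

theorem map_getD_countdown (xs : List Int) :
    ∀ (r : Nat), r ≤ xs.length →
      (PySem.List.pyRange ((r : Int) - 1) (-1) (-1)).map (fun i => PySem.List.pyGetD xs i 0)
        = (xs.take r).reverse := by
  intro r
  induction r with
  | zero => intro _; simp [PySem.List.pyRange_neg_one_eq_nil]
  | succ n ih =>
    intro hr
    have h1 : ((n + 1 : Nat) : Int) - 1 = (n : Int) := by push_cast; ring
    rw [h1, PySem.List.pyRange_neg_one_cons (by omega : (-1:Int) < (n:Int))]
    simp only [List.map]
    rw [ih (by omega)]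
    have hg : xs[n]? = some xs[n] := List.getElem?_eq_getElem (by omega)
    rw [PySem.List.pyGetD_natCast, List.getD_eq_getElem _ _ (by omega), List.take_add_one,
      List.reverse_append, hg]
    simp
    rfl

theorem lds_pop_mono (line : List Int) {h' h : Int} (hle : h' ≤ h) :
    ∀ s : List Int, lds_pop line h (lds_pop line h' s) = lds_pop line h s := by
  intro s
  induction s with
  | nil => rfl
  | cons i rest ih =>
    by_cases hi : PySem.List.pyGetD line i 0 < h'
    · rw [lds_pop, if_pos hi, ih, lds_pop, if_pos (lt_of_lt_of_le hi hle)]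
    · rw [lds_pop, if_neg hi]

theorem lds_go_spec (line : List Int) :
    ∀ (rest done stack res : List Int),
      line = done ++ rest →
      (∀ h : Int,
        (match lds_pop line h stack with
         | [] => (done.length : Int)
         | i :: _ => (done.length : Int) - i) = view h done.reverse) →
      lds_go line (PySem.List.enumerate rest (done.length : Int)) stack res
        = res.reverse ++ specFrom done rest := by
  intro rest
  induction rest with
  | nil => intro done stack res _ _; simp [PySem.List.enumerate_nil, lds_go, specFrom]
  | cons x t ih =>
    intro done stack res hline hinv
    rw [PySem.List.enumerate_cons, lds_go]
    have hlookup : PySem.List.pyGetD line (done.length : Int) 0 = x := by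
      rw [hline, PySem.List.pyGetD_natCast, List.getD_eq_getElem _ _ (by simp),
        List.getElem_append_right (by omega)]
      simp
    have hd : (match lds_pop line x stack with
         | [] => (done.length : Int)
         | i :: _ => (done.length : Int) - i) = view x done.reverse := hinv x
    have hinv' : ∀ h : Int,
        (match lds_pop line h ((done.length : Int) :: lds_pop line x stack) with
         | [] => ((done ++ [x]).length : Int)
         | i :: _ => ((done ++ [x]).length : Int) - i) = view h (done ++ [x]).reverse := by
      intro h
      have hrev : (done ++ [x]).reverse = x :: done.reverse := by simp
      by_cases hx : x < h
      · rw [lds_pop, if_pos (by rw [hlookup]; exact hx),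
          lds_pop_mono line (le_of_lt hx) stack, hrev]
        have := hinv h
        rcases hpop : lds_pop line h stack with _ | ⟨i, s⟩
        · rw [hpop] at this
          have h0 : ((done.length : Int)) = view h done.reverse := this
          simp only [view, if_neg (not_le.mpr hx), List.length_append, List.length_cons,
            List.length_nil]
          push_cast at h0 ⊢
          rw [← h0]; ring
        · rw [hpop] at this
          have h0 : ((done.length : Int)) - i = view h done.reverse := this
          simp only [view, if_neg (not_le.mpr hx), List.length_append, List.length_cons,
            List.length_nil]
          push_cast at h0 ⊢
          rw [← h0]; ring
      · rw [lds_pop, if_neg (by rw [hlookup]; exact hx), hrev]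
        simp only [view, if_pos (not_lt.mp hx)]
        simp only [List.length_append, List.length_cons, List.length_nil]
        push_cast
        ring
    have hrec := ih (done ++ [x]) ((done.length : Int) :: lds_pop line x stack)
      ((match lds_pop line x stack with
        | [] => (done.length : Int)
        | i :: _ => (done.length : Int) - i) :: res)
      (by rw [hline]; simp) hinv'
    simp only [List.length_append, List.length_cons, List.length_nil] at hrec
    have hcast : ((done.length : Int) + 1) = ((done.length + 1 : Nat) : Int) := by push_cast; ring
    rw [hcast, hrec]
    rw [specFrom, hd]
    simp

theorem dists_eq (line : List Int) : dists line = specFrom [] line := by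
  have := lds_go_spec line line [] [] [] (by simp) (by intro h; simp [lds_pop, view])
  simpa [dists] using this

theorem specFrom_length : ∀ (rest done : List Int), (specFrom done rest).length = rest.length := by
  intro rest
  induction rest with
  | nil => intro done; rfl
  | cons x t ih => intro done; simp [specFrom, ih]

theorem dists_length (line : List Int) : (dists line).length = line.length := by
  rw [dists_eq]; exact specFrom_length line []

theorem specFrom_getD :
    ∀ (rest done : List Int) (c : Nat), c < rest.length →
      (specFrom done rest).getD c 0
        = view (rest.getD c 0) ((rest.take c).reverse ++ done.reverse) := by
  intro rest
  induction rest with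
  | nil => intro done c hc; simp at hc
  | cons x t ih =>
    intro done c hc
    match c with
    | 0 => simp [specFrom, List.getD]
    | Nat.succ c' =>
      simp only [specFrom, List.getD_cons_succ]
      rw [ih (done ++ [x]) c' (by simpa using hc)]
      simp [List.getD]

theorem dists_getD (line : List Int) (c : Nat) (hc : c < line.length) :
    PySem.List.pyGetD (dists line) (c : Int) 0
      = view (line.getD c 0) ((line.take c).reverse) := by
  rw [PySem.List.pyGetD_natCast, dists_eq, specFrom_getD line [] c hc]
  simp

theorem dists_rev_getD (line : List Int) (c : Nat) (hc : c < line.length) :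
    PySem.List.pyGetD ((dists line.reverse).reverse) (c : Int) 0
      = view (line.getD c 0) (line.drop (c + 1)) := by
  have hlen : (dists line.reverse).length = line.length := by
    rw [dists_length, List.length_reverse]
  have hm : line.length - 1 - c < line.reverse.length := by simp; omega
  rw [PySem.List.pyGetD_natCast, List.getD_eq_getElem _ _ (by simp [hlen]; omega),
    List.getElem_reverse]
  have hspec := dists_getD line.reverse (line.length - 1 - c) (by simp; omega)
  rw [PySem.List.pyGetD_natCast, List.getD_eq_getElem _ _ (by simp [hlen]; omega)] at hspec
  have hgidx : (dists line.reverse)[(dists line.reverse).length - 1 - c]'(by omega)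
      = (dists line.reverse)[line.length - 1 - c]'(by omega) := by
    congr 1
    omega
  rw [hgidx, hspec]
  have e1 : line.reverse.getD (line.length - 1 - c) 0 = line.getD c 0 := by
    rw [List.getD_eq_getElem _ _ hm, List.getElem_reverse, List.getD_eq_getElem _ _ hc]
    congr 1
    omega
  have e2 : (List.take (line.length - 1 - c) line.reverse).reverse = List.drop (c + 1) line := by
    rw [List.take_reverse, List.reverse_reverse]
    congr 1
    omega
  rw [e1, e2]

theorem enumerate_eq (xs : List (List Int)) :
    ∀ s : Int, PySem.List.enumerate xs s
      = (List.range xs.length).map (fun k : Nat => ((s + (k : Int)), xs.getD k [])) := by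
  intro s
  induction xs generalizing s with
  | nil => simp [PySem.List.enumerate_nil]
  | cons x t ih =>
    rw [PySem.List.enumerate_cons, ih, List.length_cons, List.range_succ_eq_map]
    simp only [List.map_cons, List.map_map]
    refine congrArg₂ List.cons (by simp) (List.map_congr_left ?_)
    intro k hk
    simp only [Function.comp_apply, Prod.mk.injEq, List.getD_cons_succ]
    exact ⟨by push_cast; ring, trivial⟩


-- the c-th column of the grid, as B's comprehension builds it
def colL (g : List (List Int)) (cn : Nat) : List Int :=
  g.map (fun row => PySem.List.pyGetD row (cn : Int) 0)

theorem colL_length (g : List (List Int)) (cn : Nat) : (colL g cn).length = g.length := by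
  simp [colL]

theorem cell_col (g : List (List Int)) (cn : Nat) (i : Int) (h0 : 0 ≤ i) (_hi : i < (g.length : Int)) :
    pyCell g i (cn : Int) = PySem.List.pyGetD (colL g cn) i 0 := by
  have hiN : i = ((i.toNat : Nat) : Int) := (Int.toNat_of_nonneg h0).symm
  have hf : PySem.List.pyGetD ([] : List Int) (cn : Int) 0 = 0 := by simp [pysem]
  rw [hiN, pyCell, PySem.List.pyGetD_natCast, PySem.List.pyGetD_natCast, colL]
  calc (g.getD i.toNat []).getD cn 0
      = PySem.List.pyGetD (g.getD i.toNat []) (cn : Int) 0 := by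
        rw [PySem.List.pyGetD_natCast]
    _ = (g.map (fun row => PySem.List.pyGetD row (cn : Int) 0)).getD i.toNat
          (PySem.List.pyGetD ([] : List Int) (cn : Int) 0) := by rw [List.getD_map]
    _ = (g.map (fun row => PySem.List.pyGetD row (cn : Int) 0)).getD i.toNat 0 := by rw [hf]
    _ = PySem.List.pyGetD (g.map (fun row => PySem.List.pyGetD row (cn : Int) 0))
          ((i.toNat : Nat) : Int) 0 := by rw [PySem.List.pyGetD_natCast]

theorem cell_row (g : List (List Int)) (k : Nat) (j : Int) :
    pyCell g (k : Int) j = PySem.List.pyGetD (g.getD k []) j 0 := by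
  rw [pyCell, PySem.List.pyGetD_natCast]

theorem getD_colL (g : List (List Int)) (cn k : Nat) :
    (colL g cn).getD k 0 = (g.getD k []).getD cn 0 := by
  have hf : PySem.List.pyGetD ([] : List Int) (cn : Int) 0 = 0 := by simp [pysem]
  calc (colL g cn).getD k 0
      = (g.map (fun row => PySem.List.pyGetD row (cn : Int) 0)).getD k
          (PySem.List.pyGetD ([] : List Int) (cn : Int) 0) := by rw [colL, hf]
    _ = PySem.List.pyGetD (g.getD k []) (cn : Int) 0 := by rw [List.getD_map]
    _ = (g.getD k []).getD cn 0 := by rw [PySem.List.pyGetD_natCast]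

theorem check_up_eq (g : List (List Int)) (k cn : Nat) (_hk : k < g.length) :
    check_up (k : Int) (cn : Int) g
      = view ((g.getD k []).getD cn 0) (((colL g cn).take k).reverse) := by
  rw [check_up, scan_loop_eq]
  have h1 : ∀ i ∈ PySem.List.pyRange ((k : Int) - 1) (-1) (-1),
      pyCell g i (cn : Int) = PySem.List.pyGetD (colL g cn) i 0 := by
    intro i hi
    rw [PySem.List.mem_pyRange_neg_one] at hi
    exact cell_col g cn i (by omega) (by omega)
  rw [List.map_congr_left h1, map_getD_countdown (colL g cn) k (by rw [colL_length]; omega),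
    cell_row, PySem.List.pyGetD_natCast]
  ring

theorem check_down_eq (g : List (List Int)) (k cn : Nat) (_hk : k < g.length) :
    check_down (k : Int) (cn : Int) g
      = view ((g.getD k []).getD cn 0) ((colL g cn).drop (k + 1)) := by
  rw [check_down, scan_loop_eq]
  have h1 : ∀ i ∈ PySem.List.pyRange ((k : Int) + 1) (g.length : Int) 1,
      pyCell g i (cn : Int) = PySem.List.pyGetD (colL g cn) i 0 := by
    intro i hi
    rw [PySem.List.mem_pyRange_one] at hi
    exact cell_col g cn i (by omega) (by omega)
  have hlen : (g.length : Int) = PySem.List.len (colL g cn) := by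
    simp [colL_length]
  rw [List.map_congr_left h1, hlen,
    PySem.List.map_pyGetD_pyRange (colL g cn) 0 (by positivity),
    cell_row, PySem.List.pyGetD_natCast]
  have : ((k : Int) + 1).toNat = k + 1 := by omega
  rw [this]
  ring

theorem check_left_eq (g : List (List Int)) (k cn : Nat)
    (hc : cn ≤ (g.getD k []).length) :
    check_left (k : Int) (cn : Int) g
      = view ((g.getD k []).getD cn 0) (((g.getD k []).take cn).reverse) := by
  rw [check_left, scan_loop_eq]
  have h1 : ∀ i ∈ PySem.List.pyRange ((cn : Int) - 1) (-1) (-1),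
      pyCell g (k : Int) i = PySem.List.pyGetD (g.getD k []) i 0 := fun i _ => cell_row g k i
  rw [List.map_congr_left h1, map_getD_countdown _ cn hc, cell_row, PySem.List.pyGetD_natCast]
  ring

theorem check_right_eq (g : List (List Int)) (k cn : Nat) :
    check_right (k : Int) (cn : Int) g
      = view ((g.getD k []).getD cn 0) ((g.getD k []).drop (cn + 1)) := by
  rw [check_right, scan_loop_eq, PySem.List.pyGetD_natCast]
  have h1 : ∀ i ∈ PySem.List.pyRange ((cn : Int) + 1) (((g.getD k []).length : Int)) 1,
      pyCell g (k : Int) i = PySem.List.pyGetD (g.getD k []) i 0 := fun i _ => cell_row g k i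
  have hlen : (((g.getD k []).length : Nat) : Int) = PySem.List.len (g.getD k []) := by simp
  rw [List.map_congr_left h1, hlen,
    PySem.List.map_pyGetD_pyRange (g.getD k []) 0 (by positivity),
    cell_row, PySem.List.pyGetD_natCast]
  have : ((cn : Int) + 1).toNat = cn + 1 := by omega
  rw [this]
  ring

theorem part_2_eq_alt (g : List (List Int)) (hpre : Pre_part_2 g) :
    part_2 g = part_2_alt g := by
  cases g with
  | nil => rfl
  | cons r0 rest =>
    have hC : ∀ row ∈ r0 :: rest, row.length = r0.length := by
      simpa [Pre_part_2] using hpre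
    simp only [part_2, part_2_alt]
    rw [PySem.List.pyRange_one, enumerate_eq]
    have hR : (((r0 :: rest).length : Int) - 0).toNat = (r0 :: rest).length := by simp
    rw [hR, List.foldl_map, List.foldl_map]
    apply PySem.List.foldl_congr_mem
    intro acc k hkmem
    have hk : k < (r0 :: rest).length := List.mem_range.mp hkmem
    simp only [zero_add]
    have hρmem : (r0 :: rest).getD k [] ∈ r0 :: rest := by
      rw [List.getD_eq_getElem _ _ hk]
      exact List.getElem_mem hk
    have hρ : ((r0 :: rest).getD k []).length = r0.length := hC _ hρmem
    rw [PySem.List.pyGetD_natCast]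
    apply PySem.List.foldl_congr_mem
    intro best c hcmem
    rw [PySem.List.mem_pyRange_one] at hcmem
    have hcn : c = ((c.toNat : Nat) : Int) := (Int.toNat_of_nonneg hcmem.1).symm
    set cn := c.toNat with hcndef
    have hclt : cn < ((r0 :: rest).getD k []).length := by omega
    have hcC : cn < r0.length := by omega
    rw [hcn]
    congr 1
    -- A side: the four directional scans as `view` values
    rw [check_up_eq _ k cn hk, check_down_eq _ k cn hk, check_left_eq _ k cn (le_of_lt hclt),
      check_right_eq _ k cn]
    -- B side: the four table lookups as the same `view` values
    rw [List.map_map, List.map_map,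
      PySem.List.pyGetD_map_pyRange _ r0.length cn [] hcC,
      PySem.List.pyGetD_map_pyRange _ r0.length cn [] hcC]
    simp only [Function.comp_apply]
    rw [show ((r0 :: rest).map (fun row => PySem.List.pyGetD row ((cn : Nat) : Int) 0))
          = colL (r0 :: rest) cn from rfl]
    rw [dists_getD (colL (r0 :: rest) cn) k (by rw [colL_length]; exact hk),
      dists_rev_getD (colL (r0 :: rest) cn) k (by rw [colL_length]; exact hk),
      dists_getD ((r0 :: rest).getD k []) cn hclt,
      dists_rev_getD ((r0 :: rest).getD k []) cn hclt,
      getD_colL]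

-- ===== VERDICT (by name: the statement is the Claim_ definition above) =====
theorem part_2_spec : Claim_equal_part_2 := by
  intro tree_grid _hdom hpre
  exact part_2_eq_alt tree_grid hpre
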